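-- pv_equiv track=rewrite | github.com/LemonTea227/PCloud | PCloud Server/pcloud_server.py | album_naming
-- ===== SOURCE A (Python) =====
-- def album_naming(name, names):
--     """
--     this function is responsible for generating an available name
--     :param name: the name we want to check if valid
--     :param names: the names we already have
--     :return: an available name
--     """
--     if name not in names:
--         return name
--     else:
--         if "(" not in name:
--             return album_naming(name + "(1)", names)
--         else:
--             parts = name.split("(")
--             try:
--                 name = "(".join(parts[:-1])
--                 num = int(parts[-1][:-1])
--                 return album_naming(name + "(" + str(num + 1) + ")", names)
--             except Exception:
--                 name = "(".join(parts)
--                 return album_naming(name + "(1)", names)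
-- ===== SOURCE B (Python) =====
-- def album_naming(name, names):
--     """
--     this function is responsible for generating an available name
--     :param name: the name we want to check if valid
--     :param names: the names we already have
--     :return: an available name
--     """
--     while name in names:
--         head, sep, tail = name.rpartition("(")
--         if sep:
--             try:
--                 name = head + "(" + str(int(tail[:-1]) + 1) + ")"
--                 continue
--             except Exception:
--                 pass
--         name = name + "(1)"
--     return name
-- ===== Notes on version B (the rewrite author's own statement) =====
-- stated objective: idiomatic
-- what changed: A's recursion with split('(') / '('.join reassembly is replaced by an iterative while-loop that splits the name at its last '(' with str.rpartition and rebuilds the candidate directly from the two halves.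
import Mathlib
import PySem

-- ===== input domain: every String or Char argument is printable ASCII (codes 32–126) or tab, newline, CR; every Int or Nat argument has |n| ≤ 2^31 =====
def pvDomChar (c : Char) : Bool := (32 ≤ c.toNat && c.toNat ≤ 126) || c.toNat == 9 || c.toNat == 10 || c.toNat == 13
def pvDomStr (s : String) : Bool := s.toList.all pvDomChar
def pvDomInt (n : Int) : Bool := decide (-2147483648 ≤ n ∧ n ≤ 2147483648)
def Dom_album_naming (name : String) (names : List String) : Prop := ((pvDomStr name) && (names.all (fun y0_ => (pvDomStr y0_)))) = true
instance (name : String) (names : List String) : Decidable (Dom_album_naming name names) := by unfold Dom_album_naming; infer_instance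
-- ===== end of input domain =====

-- B replaces A's split/join recursion by an iterative while-loop that splits the name at its
-- LAST "(" with str.rpartition and rebuilds the candidate from the two halves (objective: idiomatic).

-- ===== PORT A =====
-- A's recursion, fuel-guarded for totality only: all candidates the chain tries are pairwise
-- distinct and every candidate that is tried again lies in `names`, so `names.length + 1`
-- recursive steps always suffice when the Python returns.
-- Python's `try: … int(…) … except:` is ported as Option.elim on `ofStr?` (`none` = the except branch).
def albumGoA (names : List String) : Nat → String → String
  | 0, nm => nm
  | f + 1, nm =>
    if names.contains nm = false then nm
    else if PySem.Str.isIn "(" nm = false then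
      albumGoA names f (nm ++ "(1)")
    else
      (PySem.Int.ofStr? (PySem.Str.slice (PySem.List.pyGetD ((PySem.Str.split? nm "(").getD []) (-1) "") none (some (-1)))).elim
        (albumGoA names f (PySem.Str.join "(" ((PySem.Str.split? nm "(").getD []) ++ "(1)"))
        (fun num => albumGoA names f (PySem.Str.join "(" (PySem.List.slice ((PySem.Str.split? nm "(").getD []) none (some (-1))) ++ "(" ++ PySem.Int.toStr (num + 1) ++ ")"))

def album_naming (name : String) (names : List String) : String :=
  albumGoA names (names.length + 1) name

-- ===== PORT B =====
-- hand port of Source B's `head, sep, tail = name.rpartition("(")` for the one-char separator "(":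
-- `some (head, tail)` splits at the LAST '(' (exact: structural recursion finds the rightmost
-- occurrence), `none` is Python's sep == "" case (no '(' present).
def rpartParen : List Char → Option (List Char × List Char)
  | [] => none
  | a :: rest =>
    match rpartParen rest with
    | some (u, v) => some (a :: u, v)
    | none => if a = '(' then some ([], rest) else none

-- one iteration of Source B's loop body on a taken name (try/except int ported as match on ofChars?,
-- `none` = the except branch; tail[:-1] is the slice primitive)
def albumStep (cs : List Char) : List Char :=
  match rpartParen cs with
  | some (u, v) =>
    match PySem.Int.ofChars? (PySem.List.slice v none (some (-1))) with
    | some num => u ++ '(' :: (PySem.Int.toChars (num + 1) ++ [')'])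
    | none => cs ++ ['(', '1', ')']
  | none => cs ++ ['(', '1', ')']

-- Source B's `while name in names:` loop, fuel-guarded for totality only (same bound as A)
def albumLoop (names : List String) : Nat → String → String
  | 0, nm => nm
  | f + 1, nm =>
    if names.contains nm then albumLoop names f (String.ofList (albumStep nm.toList)) else nm

def album_naming_alt (name : String) (names : List String) : String :=
  albumLoop names (names.length + 1) name

-- ===== PRECONDITION & SPEC =====
def Spec_album_naming (name : String) (names : List String) (out : String) : Prop := out = album_naming_alt name names
instance (name : String) (names : List String) (out : String) : Decidable (Spec_album_naming name names out) := by unfold Spec_album_naming; infer_instance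

-- ===== CLAIM (what is proved, stated in full; the proofs are below) =====
def Claim_equal_album_naming : Prop := ∀ (name : String) (names : List String), Dom_album_naming name names → Spec_album_naming name names (album_naming name names)

-- ===== LEMMAS AND PROOFS =====

-- A's candidate-successor expression, factored out of albumGoA's branches for the proof
def nextA (nm : String) : String :=
  if PySem.Str.isIn "(" nm = false then nm ++ "(1)"
  else
    match PySem.Int.ofStr? (PySem.Str.slice (PySem.List.pyGetD ((PySem.Str.split? nm "(").getD []) (-1) "") none (some (-1))) with
    | none => PySem.Str.join "(" ((PySem.Str.split? nm "(").getD []) ++ "(1)"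
    | some num => PySem.Str.join "(" (PySem.List.slice ((PySem.Str.split? nm "(").getD []) none (some (-1))) ++ "(" ++ PySem.Int.toStr (num + 1) ++ ")"

theorem goA_succ_of_contains (names : List String) (f : Nat) (nm : String)
    (h : names.contains nm = true) :
    albumGoA names (f + 1) nm = albumGoA names f (nextA nm) := by
  rw [albumGoA, nextA, h]
  simp only [Bool.true_eq_false, if_false]
  split_ifs with h1
  · rfl
  · cases PySem.Int.ofStr? (PySem.Str.slice (PySem.List.pyGetD ((PySem.Str.split? nm "(").getD []) (-1) "") none (some (-1))) <;> rfl

-- rpartParen finds the last '(' : specification lemmas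
theorem rpartParen_none_iff (cs : List Char) : rpartParen cs = none ↔ '(' ∉ cs := by
  induction cs with
  | nil => simp [rpartParen]
  | cons a rest ih =>
    rw [rpartParen]
    cases hr : rpartParen rest with
    | some p => simp [hr] at ih ⊢; exact fun _ => ih
    | none =>
      rw [ih] at hr
      by_cases ha : a = '('
      · simp [ha]
      · simp [ha, hr, Ne.symm ha]

theorem rpartParen_spec (cs u v : List Char) (h : rpartParen cs = some (u, v)) :
    cs = u ++ '(' :: v ∧ '(' ∉ v := by
  induction cs generalizing u v with
  | nil => simp [rpartParen] at h
  | cons a rest ih =>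
    rw [rpartParen] at h
    cases hr : rpartParen rest with
    | some p =>
      obtain ⟨u', v'⟩ := p
      rw [hr] at h
      simp only [Option.some.injEq, Prod.mk.injEq] at h
      obtain ⟨hu, hv⟩ := h
      obtain ⟨h1, h2⟩ := ih u' v' hr
      subst hu hv h1
      exact ⟨rfl, h2⟩
    | none =>
      rw [hr] at h
      by_cases ha : a = '('
      · subst ha
        rw [if_pos rfl] at h
        simp only [Option.some.injEq, Prod.mk.injEq] at h
        obtain ⟨hu, hv⟩ := h
        subst hu; subst hv
        exact ⟨rfl, (rpartParen_none_iff rest).mp hr⟩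
      · simp [ha] at h

-- a structural model of PySem.Chars.splitOn for the one-char separator ['(']
def splitParen : List Char → List (List Char)
  | [] => [[]]
  | a :: rest =>
    if a = '(' then [] :: splitParen rest
    else (a :: (splitParen rest).headI) :: (splitParen rest).tail

theorem splitParen_ne_nil (cs : List Char) : splitParen cs ≠ [] := by
  cases cs with
  | nil => simp [splitParen]
  | cons a rest => rw [splitParen]; split_ifs <;> simp

theorem go_fuel_spec (l : List Char) : ∀ (fuel : Nat), l.length ≤ fuel → ∀ (cur : List Char) (acc : List (List Char)),
    PySem.Chars.splitOn.go ['('] fuel l cur acc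
      = acc.reverse ++ (cur.reverse ++ (splitParen l).headI) :: (splitParen l).tail := by
  induction l with
  | nil =>
    intro fuel _ cur acc
    cases fuel <;> simp [PySem.Chars.splitOn.go, splitParen]
  | cons a rest ih =>
    intro fuel hf cur acc
    cases fuel with
    | zero => simp at hf
    | succ f =>
      have hf' : rest.length ≤ f := by simpa using hf
      rw [PySem.Chars.splitOn.go]
      by_cases ha : a = '('
      · have hpre : List.isPrefixOf ['('] (a :: rest) = true := by
          simp [List.isPrefixOf, ha]
        rw [if_pos hpre]
        have := ih f hf' [] (cur.reverse :: acc)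
        have hdrop : List.drop (['('] : List Char).length (a :: rest) = rest := by simp
        rw [hdrop, this, splitParen, if_pos ha]
        rcases hsp : splitParen rest with _ | ⟨h0, t0⟩
        · exact absurd hsp (splitParen_ne_nil rest)
        · simp
      · have hpre : List.isPrefixOf ['('] (a :: rest) = false := by
          simp [List.isPrefixOf]; exact fun h => absurd h.symm ha
        rw [if_neg (by simp [hpre])]
        rw [ih f hf' (a :: cur) acc, splitParen, if_neg ha]
        rcases hsp : splitParen rest with _ | ⟨h0, t0⟩
        · exact absurd hsp (splitParen_ne_nil rest)
        · simp

theorem splitOn_eq_splitParen (cs : List Char) :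
    PySem.Chars.splitOn cs ['('] = splitParen cs := by
  rw [PySem.Chars.splitOn, go_fuel_spec cs (cs.length + 1) (by omega) [] []]
  rcases hsp : splitParen cs with _ | ⟨h0, t0⟩
  · exact absurd hsp (splitParen_ne_nil cs)
  · simp

theorem splitParen_no_paren (v : List Char) (h : '(' ∉ v) : splitParen v = [v] := by
  induction v with
  | nil => simp [splitParen]
  | cons a rest ih =>
    simp only [List.mem_cons, not_or] at h
    rw [splitParen, if_neg (fun h' => h.1 h'.symm), ih h.2]
    simp

theorem splitParen_append_last (u v : List Char) (h : '(' ∉ v) :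
    splitParen (u ++ '(' :: v) = splitParen u ++ [v] := by
  induction u with
  | nil => simp [splitParen, splitParen_no_paren v h]
  | cons a rest ih =>
    by_cases ha : a = '('
    · simp only [List.cons_append, splitParen, if_pos ha, ih]
    · simp only [List.cons_append, splitParen, if_neg ha, ih]
      rcases hsp : splitParen rest with _ | ⟨h0, t0⟩
      · exact absurd hsp (splitParen_ne_nil rest)
      · simp

theorem join_splitParen (u : List Char) : PySem.Chars.join ['('] (splitParen u) = u := by
  induction u with
  | nil => simp [splitParen, PySem.Chars.join_singleton]
  | cons a rest ih =>
    by_cases ha : a = '('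
    · rw [splitParen, if_pos ha]
      rcases hsp : splitParen rest with _ | ⟨h0, t0⟩
      · exact absurd hsp (splitParen_ne_nil rest)
      · rw [PySem.Chars.join_cons_cons, ← hsp, ih, ha]; simp
    · rw [splitParen, if_neg ha]
      rcases hsp : splitParen rest with _ | ⟨h0, t0⟩
      · exact absurd hsp (splitParen_ne_nil rest)
      · cases t0 with
        | nil =>
          rw [hsp] at ih
          simp only [List.headI, List.tail]
          rw [PySem.Chars.join_singleton] at ih ⊢
          rw [ih]
        | cons x t1 =>
          rw [hsp] at ih
          simp only [List.headI, List.tail]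
          rw [PySem.Chars.join_cons_cons] at ih ⊢
          rw [List.cons_append, List.cons_append, ih]

-- a '(' in the list is an infix ['(']
theorem singleton_infix_of_mem (cs : List Char) (h : '(' ∈ cs) : ['('] <:+: cs := by
  obtain ⟨u, v, rfl⟩ := List.append_of_mem h
  exact ⟨u, v, by simp⟩

-- the parts list A computes, as a list of strings whose toList is splitParen
theorem split?_getD_eq (nm : String) :
    ∃ P : List String, (PySem.Str.split? nm "(").getD [] = P ∧ P.map String.toList = splitParen nm.toList := by
  have hb := PySem.Str.split?_map nm "("
  rw [show ("(" : String).toList = ['('] from rfl] at hb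
  rw [PySem.Chars.split?] at hb
  simp only [List.isEmpty_cons, if_false, Bool.false_eq_true] at hb
  cases hs : PySem.Str.split? nm "(" with
  | none => rw [hs] at hb; simp at hb
  | some P =>
    rw [hs] at hb
    simp only [Option.map_some, Option.some.injEq] at hb
    exact ⟨P, by simp, by rw [hb, splitOn_eq_splitParen]⟩

theorem ofStr?_toList (s : String) : PySem.Int.ofStr? s = PySem.Int.ofChars? s.toList := by
  rw [← PySem.Int.ofStr?_ofList s.toList]
  congr 1
  exact (String.ofList_toList).symm

-- THE step lemma: A's successor expression computes B's loop body
theorem nextA_eq_step (nm : String) : nextA nm = String.ofList (albumStep nm.toList) := by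
  rw [nextA, albumStep]
  cases hrp : rpartParen nm.toList with
  | none =>
    have hni : '(' ∉ nm.toList := (rpartParen_none_iff nm.toList).mp hrp
    have hisin : PySem.Str.isIn "(" nm = false := by
      rw [← Bool.not_eq_true, PySem.Str.isIn_iff_infix]
      rw [show ("(" : String).toList = ['('] from rfl]
      intro hinf
      exact hni (hinf.mem (by simp))
    rw [if_pos hisin]
    apply String.ext
    simp [String.toList_append]
  | some p =>
    obtain ⟨u, v⟩ := p
    obtain ⟨hdec, hnv⟩ := rpartParen_spec nm.toList u v hrp
    have hisin : PySem.Str.isIn "(" nm = true := by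
      rw [PySem.Str.isIn_iff_infix, show ("(" : String).toList = ['('] from rfl]
      exact singleton_infix_of_mem _ (by rw [hdec]; simp)
    rw [if_neg (by rw [hisin]; simp)]
    obtain ⟨P, hP, hPl⟩ := split?_getD_eq nm
    rw [hdec, splitParen_append_last u v hnv] at hPl
    -- P = Q ++ [w] with w.toList = v and Q.map toList = splitParen u
    have hPne : P ≠ [] := by
      intro h; rw [h] at hPl; exact absurd hPl.symm (by simp [splitParen_ne_nil])
    obtain ⟨Q, w, rfl⟩ : ∃ Q w, P = Q ++ [w] := by
      rcases List.eq_nil_or_concat P with h | ⟨Q, w, h⟩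
      · exact absurd h hPne
      · exact ⟨Q, w, by simpa using h⟩
    rw [List.map_append, List.map_cons, List.map_nil] at hPl
    have hw : w.toList = v := by
      have := congrArg (fun l => l.getLast? ) hPl
      simpa using this
    have hQ : Q.map String.toList = splitParen u := by
      have hlen : (Q.map String.toList).length = (splitParen u).length := by
        have := congrArg List.length hPl
        simpa using this
      exact List.append_inj_left hPl (by simpa using hlen)
    rw [hP]
    have hlast : PySem.List.pyGetD (Q ++ [w]) (-1) "" = w :=
      PySem.List.pyGetD_neg_one_append_singleton Q w ""
    rw [hlast]
    have hsl : PySem.Int.ofStr? (PySem.Str.slice w none (some (-1)))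
        = PySem.Int.ofChars? (PySem.List.slice v none (some (-1))) := by
      rw [ofStr?_toList, PySem.List.slice_to_neg_one, ← hw, PySem.Str.slice_to_neg_one]
    rw [hsl]
    cases hn : PySem.Int.ofChars? (PySem.List.slice v none (some (-1))) with
    | none =>
      apply String.ext
      simp only [hn, String.toList_ofList, String.toList_append, PySem.Str.toList_join,
        List.map_append, List.map_cons, List.map_nil]
      rw [show ("(" : String).toList = ['('] from rfl, hPl,
        ← splitParen_append_last u v hnv, ← hdec, join_splitParen]
      simp
    | some num =>
      apply String.ext
      simp only [hn, String.toList_ofList, String.toList_append, PySem.Str.toList_join]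
      rw [PySem.List.slice_to_neg_one, List.dropLast_concat, hQ,
        show ("(" : String).toList = ['('] from rfl, join_splitParen, PySem.Int.toList_toStr]
      simp

-- lockstep: A's recursion and B's loop agree at every fuel
theorem goA_eq_loop (names : List String) (f : Nat) (nm : String) :
    albumGoA names f nm = albumLoop names f nm := by
  induction f generalizing nm with
  | zero => rfl
  | succ f ih =>
    by_cases h : names.contains nm = true
    · rw [goA_succ_of_contains names f nm h, nextA_eq_step, ih, albumLoop, if_pos h]
    · rw [Bool.not_eq_true] at h
      rw [albumGoA, albumLoop, h, if_pos rfl, if_neg (by simp)]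

-- ===== VERDICT (by name: the statement is the Claim_ definition above) =====
theorem album_naming_spec : Claim_equal_album_naming := by
  intro name names _
  unfold Spec_album_naming album_naming album_naming_alt
  exact goA_eq_loop names (names.length + 1) name
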